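-- pv_equiv track=rewrite | github.com/meezlung/git-test | lab00/lab0a_draft.py | num_slimes_after
-- ===== SOURCE A (Python) =====
-- def num_slimes_after(sizes: list[int], d: int) -> int:
--     sizes_copy = sizes.copy()
--
--     for _ in range(d):
--         new_sizes: list[int] = []
--
--         # iterate through each size
--         for size in sizes_copy:
--             if 10 <= size < 100: # if two digit number
--                 x = size // 10
--                 y = size % 10
--                 new_sizes.append(x)
--                 if y != 0: # if y is not 0
--                     new_sizes.append(y)
--
--             else:
--                 new_sizes.append(size * 2)
--         sizes_copy = new_sizes
--
--
--     return len(sizes_copy)%1_000_000_000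
-- ===== SOURCE B (Python) =====
-- MOD = 1_000_000_000
--
-- def num_slimes_after(sizes: list[int], d: int) -> int:
--     # Backward DP: ways[s] = number of slimes (mod 1e9) that one slime of
--     # size s (0 <= s < 100) becomes after the remaining days; sizes outside
--     # 0..99 never split and always stay a single slime.
--     ways = [1] * 100
--     for _ in range(d):
--         prev = ways
--         ways = [0] * 100
--         for s in range(100):
--             if 10 <= s:
--                 x, y = s // 10, s % 10
--                 ways[s] = (prev[x] + (prev[y] if y else 0)) % MOD
--             elif 1 <= s:
--                 ways[s] = prev[2 * s]
--             else:
--                 ways[s] = 1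
--     total = 0
--     for s in sizes:
--         total += ways[s] if 0 <= s < 100 else 1
--     return total % MOD
-- ===== Notes on version B (the rewrite author's own statement) =====
-- stated objective: faster
-- what changed: Replaces the explicit day-by-day simulation of the whole slime list (whose length can grow exponentially in d) by a backward dynamic program over the 100 possible splitting sizes 0..99, computing per-size slime counts mod 1e9 and summing them over the input.
import Mathlib
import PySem

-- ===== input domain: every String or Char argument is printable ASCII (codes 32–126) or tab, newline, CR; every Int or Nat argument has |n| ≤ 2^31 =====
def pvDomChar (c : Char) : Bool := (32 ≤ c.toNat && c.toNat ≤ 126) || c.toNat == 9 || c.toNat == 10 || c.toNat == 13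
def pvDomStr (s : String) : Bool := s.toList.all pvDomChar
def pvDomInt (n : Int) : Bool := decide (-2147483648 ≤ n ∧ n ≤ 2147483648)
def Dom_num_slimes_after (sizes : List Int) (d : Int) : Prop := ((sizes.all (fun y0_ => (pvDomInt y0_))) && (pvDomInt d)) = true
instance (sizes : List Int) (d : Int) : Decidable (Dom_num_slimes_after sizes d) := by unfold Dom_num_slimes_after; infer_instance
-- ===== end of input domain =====

-- B replaces A's day-by-day simulation of the whole slime list (which can grow
-- exponentially in d) by a backward DP over the 100 sizes 0..99, mod 1e9 (faster).

-- ===== PORT A =====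
-- one day of A's inner loop: build new_sizes from the current list
-- (Python lists are dynamic arrays: .append is Array.push)
def stepA (cur : Array Int) : Array Int :=
  cur.foldl (fun new_sizes size =>
    if 10 ≤ size ∧ size < 100 then
      let x := PySem.Int.floordiv size 10
      let y := PySem.Int.mod size 10
      let ns := new_sizes.push x
      if y ≠ 0 then ns.push y else ns
    else new_sizes.push (size * 2)) #[]

-- 'for _ in range(d)': repeat stepA max(d,0) times
def loopA : Nat → Array Int → Array Int
  | 0, cur => cur
  | k+1, cur => loopA k (stepA cur)

def num_slimes_after (sizes : List Int) (d : Int) : Int :=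
  PySem.Int.mod (Int.ofNat (loopA d.toNat sizes.toArray).size) 1000000000

-- ===== PORT B =====
-- one day of B's DP update: ways[s] for s in range(100); indices are the Nat
-- values of range(100), so Python's '//' and '%' on them are Nat division/mod
def waysStepB (prev : List Int) : List Int :=
  (List.range 100).map (fun s =>
    if 10 ≤ s then
      (prev.getD (s / 10) 0 + (if s % 10 ≠ 0 then prev.getD (s % 10) 0 else 0)) % 1000000000
    else if 1 ≤ s then prev.getD (2 * s) 0
    else 1)

def loopB : Nat → List Int → List Int
  | 0, w => w
  | k+1, w => loopB k (waysStepB w)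

def num_slimes_after_alt (sizes : List Int) (d : Int) : Int :=
  let ways := loopB d.toNat (List.replicate 100 1)
  let total := sizes.foldl (fun t s =>
    t + (if 0 ≤ s ∧ s < 100 then ways.getD s.toNat 0 else 1)) 0
  PySem.Int.mod total 1000000000

-- ===== PRECONDITION & SPEC =====
def Spec_num_slimes_after (sizes : List Int) (d : Int) (out : Int) : Prop := out = num_slimes_after_alt sizes d
instance (sizes : List Int) (d : Int) (out : Int) : Decidable (Spec_num_slimes_after sizes d out) := by unfold Spec_num_slimes_after; infer_instance

-- ===== CLAIM (what is proved, stated in full; the proofs are below) =====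
def Claim_equal_num_slimes_after : Prop := ∀ (sizes : List Int) (d : Int), Dom_num_slimes_after sizes d → Spec_num_slimes_after sizes d (num_slimes_after sizes d)

-- ===== LEMMAS AND PROOFS =====

-- the children one slime of size s produces in one day
def child (s : Int) : List Int :=
  if 10 ≤ s ∧ s < 100 then
    [PySem.Int.floordiv s 10] ++ (if PySem.Int.mod s 10 ≠ 0 then [PySem.Int.mod s 10] else [])
  else [s * 2]

-- list-level model of A's day loop
def listIter : Nat → List Int → List Int
  | 0, cur => cur
  | k+1, cur => listIter k (cur.flatMap child)

-- number of slimes one slime of size s becomes after k days (A's semantics)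
def lenA (s : Int) (k : Nat) : Nat := (listIter k [s]).length

-- B's DP table after k days
def wB (k : Nat) : List Int := loopB k (List.replicate 100 1)

theorem stepA_toList (cur : Array Int) :
    (stepA cur).toList = cur.toList.flatMap child := by
  unfold stepA
  rw [← Array.foldl_toList]
  suffices h : ∀ (l : List Int) (acc : Array Int),
      (l.foldl (fun new_sizes size =>
        if 10 ≤ size ∧ size < 100 then
          let x := PySem.Int.floordiv size 10
          let y := PySem.Int.mod size 10
          let ns := new_sizes.push x
          if y ≠ 0 then ns.push y else ns
        else new_sizes.push (size * 2)) acc).toList = acc.toList ++ l.flatMap child by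
    simpa using h cur.toList #[]
  intro l
  induction l with
  | nil => intro acc; simp
  | cons a t ih =>
    intro acc
    simp only [List.foldl_cons, List.flatMap_cons, ih]
    unfold child
    split_ifs <;> simp

theorem loopA_toList (k : Nat) : ∀ (cur : Array Int),
    (loopA k cur).toList = listIter k cur.toList := by
  induction k with
  | zero => intro cur; rfl
  | succ k ih => intro cur; rw [loopA, listIter, ih, stepA_toList]

theorem listIter_append (k : Nat) : ∀ (L1 L2 : List Int),
    listIter k (L1 ++ L2) = listIter k L1 ++ listIter k L2 := by
  induction k with
  | zero => intro L1 L2; rfl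
  | succ k ih =>
    intro L1 L2
    simp only [listIter, List.flatMap_append, ih]

theorem listIter_len (k : Nat) : ∀ (L : List Int),
    (listIter k L).length = (L.map (fun s => lenA s k)).sum := by
  intro L
  induction L with
  | nil =>
    have : listIter k ([] : List Int) = [] := by
      induction k with
      | zero => rfl
      | succ k ih => simpa [listIter] using ih
    simp [this]
  | cons a t ih =>
    have h : (a :: t) = [a] ++ t := rfl
    rw [h, listIter_append]
    simp [lenA, ih]

theorem lenA_succ (s : Int) (k : Nat) :
    lenA s (k + 1) = ((child s).map (fun c => lenA c k)).sum := by
  have h1 : listIter (k + 1) [s] = listIter k (child s) := by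
    rw [listIter]
    simp
  unfold lenA
  rw [h1, listIter_len]
  simp only [lenA]

theorem lenA_out (k : Nat) : ∀ (s : Int), (s < 0 ∨ 100 ≤ s) → lenA s k = 1 := by
  induction k with
  | zero => intro s _; rfl
  | succ k ih =>
    intro s hs
    have hc : child s = [s * 2] := by
      unfold child
      rw [if_neg]; omega
    rw [lenA_succ, hc]
    simp [ih (s * 2) (by omega)]

theorem lenA_zero_size (k : Nat) : lenA 0 k = 1 := by
  induction k with
  | zero => rfl
  | succ k ih =>
    have hc : child 0 = [0] := by
      unfold child
      rw [if_neg (by omega)]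
      norm_num
    rw [lenA_succ, hc]
    simpa using ih

theorem loopB_comm (k : Nat) : ∀ (w : List Int),
    loopB k (waysStepB w) = waysStepB (loopB k w) := by
  induction k with
  | zero => intro w; rfl
  | succ k ih => intro w; simp only [loopB, ih]

theorem wB_succ (k : Nat) : wB (k + 1) = waysStepB (wB k) := by
  simp only [wB, loopB, loopB_comm]

theorem getD_waysStepB (prev : List Int) (n : Nat) (hn : n < 100) :
    (waysStepB prev).getD n 0 =
      (if 10 ≤ n then
        (prev.getD (n / 10) 0 + (if n % 10 ≠ 0 then prev.getD (n % 10) 0 else 0)) % 1000000000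
      else if 1 ≤ n then prev.getD (2 * n) 0
      else 1) := by
  simp [waysStepB, List.getD_eq_getElem?_getD, hn]

theorem lenA_in (k : Nat) : ∀ (s : Int), 0 ≤ s → s < 100 →
    ((lenA s k : Int)) % 1000000000 = (wB k).getD s.toNat 0 := by
  induction k with
  | zero =>
    intro s h0 h100
    have hn : s.toNat < 100 := by omega
    have h1 : lenA s 0 = 1 := rfl
    have h2 : (wB 0).getD s.toNat 0 = 1 := by
      simp only [wB, loopB, List.getD_eq_getElem?_getD, List.getElem?_replicate, hn,
        if_true, Option.getD_some]
    rw [h1, h2]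
    norm_num
  | succ k ih =>
    intro s h0 h100
    have hn : s.toNat < 100 := by omega
    rw [wB_succ, getD_waysStepB _ _ hn]
    by_cases h10 : 10 ≤ s
    · -- splitting case: s in 10..99
      have hx : PySem.Int.floordiv s 10 = ((s.toNat / 10 : Nat) : Int) := by
        have := PySem.Int.floordiv_natCast s.toNat 10
        rwa [Int.toNat_of_nonneg h0] at this
      have hy : PySem.Int.mod s 10 = ((s.toNat % 10 : Nat) : Int) := by
        have := PySem.Int.mod_natCast s.toNat 10
        rwa [Int.toNat_of_nonneg h0] at this
      have hc : child s = [((s.toNat / 10 : Nat) : Int)] ++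
          (if s.toNat % 10 ≠ 0 then [((s.toNat % 10 : Nat) : Int)] else []) := by
        unfold child
        rw [if_pos ⟨h10, h100⟩, hx, hy]
        simp only [ne_eq, Nat.cast_eq_zero]
      have hxb : (0:Int) ≤ ((s.toNat / 10 : Nat) : Int) ∧ ((s.toNat / 10 : Nat) : Int) < 100 := by
        constructor <;> [positivity; exact_mod_cast (by omega : s.toNat / 10 < 100)]
      have hyb : (0:Int) ≤ ((s.toNat % 10 : Nat) : Int) ∧ ((s.toNat % 10 : Nat) : Int) < 100 := by
        constructor <;> [positivity; exact_mod_cast (by omega : s.toNat % 10 < 100)]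
      have ihx := ih _ hxb.1 hxb.2
      have ihy := ih _ hyb.1 hyb.2
      simp only [Int.toNat_natCast] at ihx ihy
      rw [if_pos (by omega : 10 ≤ s.toNat)]
      rw [lenA_succ, hc]
      by_cases hy0 : s.toNat % 10 = 0
      · simp only [hy0, ne_eq, not_true_eq_false, if_false, List.append_nil,
          List.map_cons, List.map_nil, List.sum_cons, List.sum_nil, add_zero]
        rw [← ihx]
        omega
      · simp only [hy0, ne_eq, not_false_eq_true, if_true]
        simp only [List.map_append, List.map_cons, List.map_nil,
          List.sum_append, List.sum_cons, List.sum_nil, add_zero]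
        rw [← ihx, ← ihy]
        push_cast
        omega
    · -- no split: s in 0..9
      rw [if_neg (by omega : ¬ 10 ≤ s.toNat)]
      by_cases h1 : 1 ≤ s
      · rw [if_pos (by omega : 1 ≤ s.toNat)]
        have hc : child s = [s * 2] := by
          unfold child
          rw [if_neg (by omega)]
        rw [lenA_succ, hc]
        have ih2 := ih (s * 2) (by omega) (by omega)
        have ht : (s * 2).toNat = 2 * s.toNat := by omega
        rw [ht] at ih2
        have : s * 2 = 2 * s := by ring
        simpa [this] using ih2
      · -- s = 0
        rw [if_neg (by omega : ¬ 1 ≤ s.toNat)]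
        have hs0 : s = 0 := by omega
        rw [hs0, lenA_zero_size]
        norm_num

theorem sum_mod (l : List Int) :
    l.sum % 1000000000 = (l.map (· % 1000000000)).sum % 1000000000 := by
  induction l with
  | nil => rfl
  | cons a t ih =>
    simp only [List.sum_cons, List.map_cons]
    rw [Int.add_emod, ih, Int.add_emod (a % 1000000000)]
    simp [Int.emod_emod_of_dvd]

theorem foldl_add_term (sizes : List Int) (f : Int → Int) :
    sizes.foldl (fun t s => t + f s) 0 = (sizes.map f).sum := by
  suffices h : ∀ init, sizes.foldl (fun t s => t + f s) init = init + (sizes.map f).sum by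
    simpa using h 0
  induction sizes with
  | nil => intro init; simp
  | cons a t ih => intro init; simp [ih, add_assoc]

-- ===== VERDICT (by name: the statement is the Claim_ definition above) =====
theorem num_slimes_after_spec : Claim_equal_num_slimes_after := by
  intro sizes d _
  unfold Spec_num_slimes_after num_slimes_after num_slimes_after_alt
  set k := d.toNat with hk
  rw [PySem.Int.mod_eq_emod_of_pos (by norm_num : (0:Int) < 1000000000),
      PySem.Int.mod_eq_emod_of_pos (by norm_num : (0:Int) < 1000000000)]
  have hsz : (loopA k sizes.toArray).size = (listIter k sizes).length := by
    rw [← Array.length_toList, loopA_toList, List.toList_toArray]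
  rw [hsz, listIter_len, foldl_add_term]
  have hcast : (Int.ofNat ((sizes.map (fun s => lenA s k)).sum)) =
      ((sizes.map (fun s => (lenA s k : Int)))).sum := by
    simp only [Int.ofNat_eq_natCast]
    push_cast
    simp [Function.comp_def]
  rw [hcast, sum_mod]
  congr 1
  rw [List.map_map]
  refine congrArg List.sum (List.map_congr_left ?_)
  intro s _
  by_cases hin : 0 ≤ s ∧ s < 100
  · simp only [Function.comp_def, hin]
    exact lenA_in k s hin.1 hin.2
  · simp only [Function.comp_def, hin, if_false]
    rw [lenA_out k s (by omega)]
    decide
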